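-- pv_equiv track=rewrite | github.com/Fabianstw/Algorithm-and-Data-Structures | Basics/Sorting/cutting_lines_solution.py | merge_to_target
-- ===== SOURCE A (Python) =====
-- def merge_to_target(lst, target_lst):
--     """
--     Merge Sort lst to look the same as target_lst
--     :param lst:
--     :param target_lst:
--     :return:
--     """
--     if len(lst) <= 1:
--         return lst, 0
--
--     mid = len(lst) // 2
--     left = lst[:mid]
--     right = lst[mid:]
--
--     left_sorted, inversions_left = merge_to_target(left, target_lst)
--     right_sorted, inversions_right = merge_to_target(right, target_lst)
--     inversions = inversions_right + inversions_left
--     result = []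
--     i, j = 0, 0
--     while i < len(left_sorted) and j < len(right_sorted):
--         if target_lst[left_sorted[i]] <= target_lst[right_sorted[j]]:
--             result.append(left_sorted[i])
--             i += 1
--         else:
--             result.append(right_sorted[j])
--             j += 1
--             inversions += (len(left_sorted) - i)
--     result += left_sorted[i:]
--     result += right_sorted[j:]
--     return result, inversions
-- ===== SOURCE B (Python) =====
-- def merge_to_target(lst, target_lst):
--     """Stable library sort by target keys, plus a direct pair-counting pass for inversions."""
--     keys = [target_lst[x] for x in lst]
--     inv = 0
--     while keys:
--         k = keys.pop(0)
--         inv += sum(1 for k2 in keys if k2 < k)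
--     order = sorted(lst, key=lambda x: target_lst[x])
--     return order, inv
-- ===== Notes on version B (the rewrite author's own statement) =====
-- stated objective: alternative
-- what changed: replaces A's recursive merge sort, which interleaves sorting with inversion counting inside the merge loop, by one stable library sort call plus a separate direct pair-counting pass over the extracted key list
-- outside the precondition, e.g. on merge_to_target([5], []): A returns ([5], 0), B raises IndexError
import Mathlib
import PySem

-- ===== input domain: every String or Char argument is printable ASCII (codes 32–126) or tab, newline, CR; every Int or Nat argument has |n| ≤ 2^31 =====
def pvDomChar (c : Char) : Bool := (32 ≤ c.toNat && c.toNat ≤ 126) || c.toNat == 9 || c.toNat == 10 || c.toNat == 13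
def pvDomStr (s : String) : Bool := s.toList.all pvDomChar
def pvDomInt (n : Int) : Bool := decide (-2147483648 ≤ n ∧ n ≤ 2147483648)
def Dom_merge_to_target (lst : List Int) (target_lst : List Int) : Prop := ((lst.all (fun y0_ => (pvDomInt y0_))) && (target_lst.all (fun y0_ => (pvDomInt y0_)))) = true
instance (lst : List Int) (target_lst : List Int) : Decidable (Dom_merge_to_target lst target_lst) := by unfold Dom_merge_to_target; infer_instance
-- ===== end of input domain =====

-- B replaces A's recursive merge sort (which interleaves sorting and inversion counting) by one
-- stable library sort call plus a separate direct pair-counting pass; alternative decomposition, not faster.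

-- ===== PORT A =====
-- length facts about the two slices, cited by the port's decreasing_by
theorem pvSliceLeft_length (lst : List Int) (h : ¬ lst.length ≤ 1) :
    (PySem.List.slice lst none (some (PySem.Int.floordiv (lst.length : Int) 2))).length < lst.length := by
  have hm : PySem.Int.floordiv (lst.length : Int) 2 = ((lst.length / 2 : Nat) : Int) := by
    exact_mod_cast PySem.Int.floordiv_natCast lst.length 2
  rw [hm, PySem.List.slice_to _ (by positivity)]
  simp only [List.length_take, Int.toNat_natCast]
  omega

theorem pvSliceRight_length (lst : List Int) (h : ¬ lst.length ≤ 1) :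
    (PySem.List.slice lst (some (PySem.Int.floordiv (lst.length : Int) 2))).length < lst.length := by
  have hm : PySem.Int.floordiv (lst.length : Int) 2 = ((lst.length / 2 : Nat) : Int) := by
    exact_mod_cast PySem.Int.floordiv_natCast lst.length 2
  rw [hm, PySem.List.slice_from _ (by positivity)]
  simp only [List.length_drop, Int.toNat_natCast]
  omega

-- the while-loop of A: recursion on the unconsumed suffixes left_sorted[i:], right_sorted[j:];
-- target_lst[x] is PySem.List.pyGetD target_lst x 0 (exact on Pre_, which admits only valid indices)
def pvMergeA (t : List Int) : List Int → List Int → List Int × Int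
  | [], rs => (rs, 0)
  | l :: ls, [] => (l :: ls, 0)
  | l :: ls, r :: rs =>
    if PySem.List.pyGetD t l 0 ≤ PySem.List.pyGetD t r 0 then
      let p := pvMergeA t ls (r :: rs)
      (l :: p.1, p.2)
    else
      let p := pvMergeA t (l :: ls) rs
      (r :: p.1, p.2 + ((l :: ls).length : Int))

def merge_to_target (lst : List Int) (target_lst : List Int) : List Int × Int :=
  if h : lst.length ≤ 1 then (lst, 0)
  else
    let mid := PySem.Int.floordiv (lst.length : Int) 2
    let left := PySem.List.slice lst none (some mid)
    let right := PySem.List.slice lst (some mid)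
    let pl := merge_to_target left target_lst
    let pr := merge_to_target right target_lst
    let pm := pvMergeA target_lst pl.1 pr.1
    (pm.1, pr.2 + pl.2 + pm.2)
termination_by lst.length
decreasing_by
  · exact pvSliceLeft_length lst h
  · exact pvSliceRight_length lst h

-- ===== PORT B =====
-- the counting while-loop of Source B: pop the first key, count strictly smaller keys among the rest
def pvCountB : List Int → Int → Int
  | [], inv => inv
  | k :: ks, inv => pvCountB ks (inv + (ks.map (fun k2 => if k2 < k then (1 : Int) else 0)).sum)

def merge_to_target_alt (lst : List Int) (target_lst : List Int) : List Int × Int :=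
  let keys := lst.map (fun x => PySem.List.pyGetD target_lst x 0)
  let inv := pvCountB keys 0
  let order := PySem.List.sorted lst (fun x => PySem.List.pyGetD target_lst x 0) false
  (order, inv)

-- ===== PRECONDITION & SPEC =====
-- Pre_ excludes lists containing an element that is not a valid Python index into target_lst:
-- with two or more such elements A raises IndexError, and on lists of length ≤ 1 A returns the
-- list without ever indexing while the natural B evaluates the keys first and raises there.
-- (Both ports totalise target_lst[x] as pyGetD _ _ 0, identically, so the equality proof below
-- happens to hold without consuming Pre_; Pre_ delimits where the ports are faithful to Python.)
def Pre_merge_to_target (lst : List Int) (target_lst : List Int) : Prop :=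
  ∀ x ∈ lst, -(target_lst.length : Int) ≤ x ∧ x < (target_lst.length : Int)
instance (lst : List Int) (target_lst : List Int) : Decidable (Pre_merge_to_target lst target_lst) := by
  unfold Pre_merge_to_target; infer_instance

def pvWitness_merge_to_target : List Int × List Int := ([1, 0, -1, 2], [7, 3, 5])

def Spec_merge_to_target (lst : List Int) (target_lst : List Int) (out : List Int × Int) : Prop := out = merge_to_target_alt lst target_lst
instance (lst : List Int) (target_lst : List Int) (out : List Int × Int) : Decidable (Spec_merge_to_target lst target_lst out) := by unfold Spec_merge_to_target; infer_instance

-- ===== CLAIM (what is proved, stated in full; the proofs are below) =====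
def Claim_equal_merge_to_target : Prop := ∀ (lst : List Int) (target_lst : List Int), Dom_merge_to_target lst target_lst → Pre_merge_to_target lst target_lst → Spec_merge_to_target lst target_lst (merge_to_target lst target_lst)

-- ===== LEMMAS AND PROOFS =====

-- the key of element x (Python: target_lst[x]) as both ports compute it
def pvK (t : List Int) (x : Int) : Int := PySem.List.pyGetD t x 0

-- number of "cross" inversion pairs between the left block as and the right block bs
def pvCross (t : List Int) (as bs : List Int) : Int :=
  (as.map (fun x => ((bs.countP (fun y => pvK t y < pvK t x) : Nat) : Int))).sum

-- number of inversion pairs inside one list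
def pvIA (t : List Int) : List Int → Int
  | [] => 0
  | x :: xs => ((xs.countP (fun y => pvK t y < pvK t x) : Nat) : Int) + pvIA t xs

theorem pvCross_cons_right (t : List Int) (as : List Int) (r : Int) (rs : List Int) :
    pvCross t as (r :: rs) = pvCross t as rs + ((as.countP (fun x => pvK t r < pvK t x) : Nat) : Int) := by
  induction as with
  | nil => simp [pvCross]
  | cons a as ih =>
    simp only [pvCross, List.map_cons, List.sum_cons, List.countP_cons] at *
    by_cases h : pvK t r < pvK t a <;> simp [h] at * <;> omega

theorem pvCross_perm (t : List Int) {as as' bs bs' : List Int}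
    (h1 : as.Perm as') (h2 : bs.Perm bs') : pvCross t as bs = pvCross t as' bs' := by
  unfold pvCross
  have hf : ∀ x : Int, ((bs.countP (fun y => pvK t y < pvK t x) : Nat) : Int)
      = ((bs'.countP (fun y => pvK t y < pvK t x) : Nat) : Int) := by
    intro x; rw [h2.countP_eq]
  calc (as.map _).sum = (as.map (fun x => ((bs'.countP (fun y => pvK t y < pvK t x) : Nat) : Int))).sum := by
        simp only [funext hf]
    _ = _ := (h1.map _).sum_eq

theorem pvIA_append (t : List Int) (a b : List Int) :
    pvIA t (a ++ b) = pvIA t a + pvIA t b + pvCross t a b := by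
  induction a with
  | nil => simp [pvIA, pvCross]
  | cons x a ih =>
    simp only [List.cons_append, pvIA, ih, List.countP_append, pvCross, List.map_cons, List.sum_cons]
    push_cast
    ring

-- the merge loop: the returned list is a merge of the two inputs …
theorem pvMergeA_fst_perm (t : List Int) (as bs : List Int) :
    (pvMergeA t as bs).1.Perm (as ++ bs) := by
  induction as, bs using pvMergeA.induct t with
  | case1 rs => simp [pvMergeA]
  | case2 l ls => simp [pvMergeA]
  | case3 l ls r rs h ih =>
    simp only [pvMergeA, if_pos h]
    exact .cons l ih
  | case4 l ls r rs h ih =>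
    simp only [pvMergeA, if_neg h]
    refine ((ih.cons r).trans ?_)
    exact (List.perm_middle).symm

theorem pvMergeA_fst_pairwise (t : List Int) (as bs : List Int)
    (ha : as.Pairwise (fun a b => pvK t a ≤ pvK t b)) (hb : bs.Pairwise (fun a b => pvK t a ≤ pvK t b)) :
    (pvMergeA t as bs).1.Pairwise (fun a b => pvK t a ≤ pvK t b) := by
  induction as, bs using pvMergeA.induct t with
  | case1 rs => simpa [pvMergeA] using hb
  | case2 l ls => simpa [pvMergeA] using ha
  | case3 l ls r rs h ih =>
    have h' : pvK t l ≤ pvK t r := h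
    simp only [pvMergeA, if_pos h]
    refine List.Pairwise.cons ?_ (ih ha.of_cons hb)
    intro z hz
    have hz' := (pvMergeA_fst_perm t ls (r :: rs)).mem_iff.mp hz
    rcases List.mem_append.mp hz' with hzl | hzr
    · exact (List.rel_of_pairwise_cons ha) hzl
    · rcases List.mem_cons.mp hzr with rfl | hzr
      · exact h'
      · exact le_trans h' ((List.rel_of_pairwise_cons hb) hzr)
  | case4 l ls r rs h ih =>
    have h' : pvK t r < pvK t l := lt_of_not_ge h
    simp only [pvMergeA, if_neg h]
    refine List.Pairwise.cons ?_ (ih ha hb.of_cons)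
    intro z hz
    have hz' := (pvMergeA_fst_perm t (l :: ls) rs).mem_iff.mp hz
    rcases List.mem_append.mp hz' with hzl | hzr
    · rcases List.mem_cons.mp hzl with rfl | hzl
      · exact le_of_lt h'
      · exact le_trans (le_of_lt h') ((List.rel_of_pairwise_cons ha) hzl)
    · exact (List.rel_of_pairwise_cons hb) hzr

theorem pvMergeA_fst_filter (t : List Int) (as bs : List Int)
    (ha : as.Pairwise (fun a b => pvK t a ≤ pvK t b)) (hb : bs.Pairwise (fun a b => pvK t a ≤ pvK t b)) (v : Int) :
    (pvMergeA t as bs).1.filter (fun y => decide (pvK t y = v)) =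
      as.filter (fun y => decide (pvK t y = v)) ++ bs.filter (fun y => decide (pvK t y = v)) := by
  induction as, bs using pvMergeA.induct t with
  | case1 rs => simp [pvMergeA]
  | case2 l ls => simp [pvMergeA]
  | case3 l ls r rs h ih =>
    have h' : pvK t l ≤ pvK t r := h
    simp only [pvMergeA, if_pos h]
    rw [List.filter_cons, ih ha.of_cons hb]
    by_cases hv : pvK t l = v <;> simp [List.filter_cons, hv]
  | case4 l ls r rs h ih =>
    have h' : pvK t r < pvK t l := lt_of_not_ge h
    simp only [pvMergeA, if_neg h]
    rw [List.filter_cons, ih ha hb.of_cons]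
    by_cases hv : pvK t r = v
    · have hnil : (l :: ls).filter (fun y => decide (pvK t y = v)) = [] := by
        rw [List.filter_eq_nil_iff]
        intro z hz
        have : pvK t r < pvK t z := by
          rcases List.mem_cons.mp hz with rfl | hz
          · exact h'
          · exact lt_of_lt_of_le h' ((List.rel_of_pairwise_cons ha) hz)
        simp only [decide_eq_true_eq]
        omega
      rw [hnil]
      simp [hv]
    · simp [List.filter_cons, hv]

-- … and the counter adds exactly the cross inversions
theorem pvMergeA_snd (t : List Int) (as bs : List Int)
    (ha : as.Pairwise (fun a b => pvK t a ≤ pvK t b)) (hb : bs.Pairwise (fun a b => pvK t a ≤ pvK t b)) :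
    (pvMergeA t as bs).2 = pvCross t as bs := by
  induction as, bs using pvMergeA.induct t with
  | case1 rs => simp [pvMergeA, pvCross]
  | case2 l ls => simp [pvMergeA, pvCross]
  | case3 l ls r rs h ih =>
    have h' : pvK t l ≤ pvK t r := h
    simp only [pvMergeA, if_pos h]
    rw [ih ha.of_cons hb]
    have hz : (r :: rs).countP (fun y => decide (pvK t y < pvK t l)) = 0 := by
      rw [List.countP_eq_zero]
      intro z hz
      have : pvK t l ≤ pvK t z := by
        rcases List.mem_cons.mp hz with rfl | hz
        · exact h'
        · exact le_trans h' ((List.rel_of_pairwise_cons hb) hz)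
      simp only [decide_eq_true_eq]
      omega
    simp [pvCross, hz]
  | case4 l ls r rs h ih =>
    have h' : pvK t r < pvK t l := lt_of_not_ge h
    simp only [pvMergeA, if_neg h]
    rw [ih ha hb.of_cons]
    have hcnt : (l :: ls).countP (fun x => decide (pvK t r < pvK t x)) = (l :: ls).length := by
      rw [List.countP_eq_length]
      intro z hz
      have : pvK t r < pvK t z := by
        rcases List.mem_cons.mp hz with rfl | hz
        · exact h'
        · exact lt_of_lt_of_le h' ((List.rel_of_pairwise_cons ha) hz)
      simpa using this
    rw [pvCross_cons_right t (l :: ls) r rs, hcnt]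

-- stability of the library sort, via its insertBy unfolding
theorem pvInsertBy_filter (t : List Int) (x : Int) (acc : List Int)
    (h : acc.Pairwise (fun a b => pvK t a ≤ pvK t b)) (v : Int) :
    (PySem.List.insertBy (fun a b => decide (pvK t a < pvK t b)) x acc).filter (fun y => decide (pvK t y = v)) =
      acc.filter (fun y => decide (pvK t y = v)) ++ (if pvK t x = v then [x] else []) := by
  induction acc with
  | nil => simp [PySem.List.insertBy, List.filter_cons]
  | cons y ys ih =>
    simp only [PySem.List.insertBy]
    by_cases hxy : pvK t x < pvK t y
    · simp only [hxy, decide_true, if_true]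
      by_cases hv : pvK t x = v
      · have hnil : (y :: ys).filter (fun z => decide (pvK t z = v)) = [] := by
          rw [List.filter_eq_nil_iff]
          intro z hz
          have : pvK t y ≤ pvK t z := by
            rcases List.mem_cons.mp hz with rfl | hz
            · exact le_refl _
            · exact List.rel_of_pairwise_cons h hz
          simp only [decide_eq_true_eq]
          omega
        rw [List.filter_cons, hnil]
        simp [hv]
      · rw [List.filter_cons]
        simp [hv]
    · simp only [hxy, decide_false, Bool.false_eq_true, if_false]
      rw [List.filter_cons, List.filter_cons, ih h.of_cons]
      by_cases hyv : pvK t y = v <;> simp [hyv]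

theorem pvSorted_filter (t : List Int) (lst : List Int) (v : Int) :
    (PySem.List.sorted lst (fun x => pvK t x) false).filter (fun y => decide (pvK t y = v)) =
      lst.filter (fun y => decide (pvK t y = v)) := by
  induction lst using List.reverseRecOn with
  | nil => rfl
  | append_singleton xs x ih =>
    rw [PySem.List.sorted_eq_foldl_insertBy, List.foldl_append, List.foldl_cons, List.foldl_nil,
      ← PySem.List.sorted_eq_foldl_insertBy]
    rw [pvInsertBy_filter t x _ (PySem.List.sorted_pairwise xs (fun x => pvK t x)) v, ih]
    by_cases hv : pvK t x = v <;> simp [hv, List.filter_append]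

-- a key-sorted list is determined by its key-class subsequences
theorem pvSorted_unique (t : List Int) (xs ys : List Int)
    (hx : xs.Pairwise (fun a b => pvK t a ≤ pvK t b)) (hy : ys.Pairwise (fun a b => pvK t a ≤ pvK t b))
    (hf : ∀ v, xs.filter (fun y => decide (pvK t y = v)) = ys.filter (fun y => decide (pvK t y = v))) :
    xs = ys := by
  induction xs generalizing ys with
  | nil =>
    cases ys with
    | nil => rfl
    | cons y ys' =>
      have := hf (pvK t y)
      simp at this
  | cons x xs' ih =>
    cases ys with
    | nil =>
      have := hf (pvK t x)
      simp at this
    | cons y ys' =>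
      have hkey : pvK t x = pvK t y := by
        rcases lt_trichotomy (pvK t x) (pvK t y) with hlt | heq | hgt
        · exfalso
          have hnil : (y :: ys').filter (fun z => decide (pvK t z = pvK t x)) = [] := by
            rw [List.filter_eq_nil_iff]
            intro z hz
            have : pvK t y ≤ pvK t z := by
              rcases List.mem_cons.mp hz with rfl | hz
              · exact le_refl _
              · exact List.rel_of_pairwise_cons hy hz
            simp only [decide_eq_true_eq]
            omega
          have := hf (pvK t x)
          rw [hnil, List.filter_cons] at this
          simp at this
        · exact heq
        · exfalso
          have hnil : (x :: xs').filter (fun z => decide (pvK t z = pvK t y)) = [] := by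
            rw [List.filter_eq_nil_iff]
            intro z hz
            have : pvK t x ≤ pvK t z := by
              rcases List.mem_cons.mp hz with rfl | hz
              · exact le_refl _
              · exact List.rel_of_pairwise_cons hx hz
            simp only [decide_eq_true_eq]
            omega
          have := hf (pvK t y)
          rw [hnil, List.filter_cons] at this
          simp at this
      have hhead := hf (pvK t x)
      rw [List.filter_cons, List.filter_cons] at hhead
      simp only [decide_eq_true_eq, hkey] at hhead
      have hxy : x = y := by
        by_cases h : pvK t x = pvK t x
        · simpa [hkey] using congrArg (fun l => l.head?) hhead
        · exact absurd rfl h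
      subst hxy
      have htail : ∀ v, xs'.filter (fun z => decide (pvK t z = v)) = ys'.filter (fun z => decide (pvK t z = v)) := by
        intro v
        by_cases hv : pvK t x = v
        · have := hf v
          rw [List.filter_cons, List.filter_cons] at this
          simpa [hv] using this
        · have := hf v
          rw [List.filter_cons, List.filter_cons] at this
          simpa [hv] using this
      exact congrArg (x :: ·) (ih ys' hx.of_cons hy.of_cons htail)

-- A computes the stable sort and the pairwise inversion count
theorem pvA_eq (lst t : List Int) :
    merge_to_target lst t = (PySem.List.sorted lst (fun x => pvK t x) false, pvIA t lst) := by
  rw [merge_to_target]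
  by_cases h : lst.length ≤ 1
  · rw [dif_pos h]
    rcases lst with _ | ⟨x, _ | ⟨y, rest⟩⟩
    · rfl
    · rfl
    · simp at h
  · rw [dif_neg h]
    have hm : PySem.Int.floordiv ((lst.length : Nat) : Int) 2 = ((lst.length / 2 : Nat) : Int) := by
      exact_mod_cast PySem.Int.floordiv_natCast lst.length 2
    have hle : PySem.List.slice lst none (some (PySem.Int.floordiv (lst.length : Int) 2)) = lst.take (lst.length / 2) := by
      rw [hm, PySem.List.slice_to _ (by positivity)]; congr 1
    have hri : PySem.List.slice lst (some (PySem.Int.floordiv (lst.length : Int) 2)) = lst.drop (lst.length / 2) := by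
      rw [hm, PySem.List.slice_from _ (by positivity)]; congr 1
    simp only [hle, hri]
    rw [pvA_eq (lst.take (lst.length / 2)) t, pvA_eq (lst.drop (lst.length / 2)) t]
    have hLR : lst.take (lst.length / 2) ++ lst.drop (lst.length / 2) = lst := List.take_append_drop _ lst
    have hsl := PySem.List.sorted_pairwise (lst.take (lst.length / 2)) (fun x => pvK t x)
    have hsr := PySem.List.sorted_pairwise (lst.drop (lst.length / 2)) (fun x => pvK t x)
    have hfst : (pvMergeA t (PySem.List.sorted (lst.take (lst.length / 2)) (fun x => pvK t x) false)
        (PySem.List.sorted (lst.drop (lst.length / 2)) (fun x => pvK t x) false)).1 =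
        PySem.List.sorted lst (fun x => pvK t x) false := by
      refine pvSorted_unique t _ _ (pvMergeA_fst_pairwise t _ _ hsl hsr)
        (PySem.List.sorted_pairwise lst (fun x => pvK t x)) ?_
      intro v
      rw [pvMergeA_fst_filter t _ _ hsl hsr v, pvSorted_filter, pvSorted_filter, pvSorted_filter,
        ← List.filter_append, hLR]
    have hsnd : (pvMergeA t (PySem.List.sorted (lst.take (lst.length / 2)) (fun x => pvK t x) false)
        (PySem.List.sorted (lst.drop (lst.length / 2)) (fun x => pvK t x) false)).2 =
        pvCross t (lst.take (lst.length / 2)) (lst.drop (lst.length / 2)) := by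
      rw [pvMergeA_snd t _ _ hsl hsr]
      exact pvCross_perm t (PySem.List.sorted_perm _ _ _) (PySem.List.sorted_perm _ _ _)
    have hIA := pvIA_append t (lst.take (lst.length / 2)) (lst.drop (lst.length / 2))
    rw [hLR] at hIA
    rw [Prod.mk.injEq]
    refine ⟨hfst, ?_⟩
    rw [hsnd]
    omega
termination_by lst.length
decreasing_by
  · simp only [List.length_take]; omega
  · simp only [List.length_drop]; omega

theorem pvCountB_eq (t : List Int) (lst : List Int) (c : Int) :
    pvCountB (lst.map (fun x => PySem.List.pyGetD t x 0)) c = c + pvIA t lst := by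
  induction lst generalizing c with
  | nil => simp [pvCountB, pvIA]
  | cons x xs ih =>
    simp only [List.map_cons, pvCountB, pvIA]
    rw [ih]
    have hs := PySem.List.sum_map_ite_one_zero (fun k2 => decide (k2 < PySem.List.pyGetD t x 0))
      (xs.map (fun y => PySem.List.pyGetD t y 0))
    simp only [decide_eq_true_eq] at hs
    rw [hs, List.countP_map]
    have : ((fun k2 => decide (k2 < PySem.List.pyGetD t x 0)) ∘ fun y => PySem.List.pyGetD t y 0)
        = fun y => decide (pvK t y < pvK t x) := rfl
    rw [this]
    omega

theorem pvB_eq (lst t : List Int) :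
    merge_to_target_alt lst t = (PySem.List.sorted lst (fun x => pvK t x) false, pvIA t lst) := by
  show (PySem.List.sorted lst (fun x => PySem.List.pyGetD t x 0) false,
      pvCountB (lst.map (fun x => PySem.List.pyGetD t x 0)) 0) = _
  rw [pvCountB_eq]
  simp [pvK]

-- ===== VERDICT (by name: the statement is the Claim_ definition above) =====
theorem merge_to_target_spec : Claim_equal_merge_to_target := by
  intro lst t _ _
  unfold Spec_merge_to_target
  rw [pvA_eq, pvB_eq]
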